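-- pv_equiv track=rewrite | github.com/qinhanhu/leetcode | spiral_matrix_螺旋矩阵问题汇总.py | spiralMatrixIII
-- ===== SOURCE A (Python) =====
-- from typing import List
--
-- def spiralMatrixIII(rows: int, cols: int, rStart: int, cStart: int) -> List[List[int]]:
--     res = []
--     r, c = rStart, cStart
--     deltar, deltac = 0, 1
--     rotateCnt = 0
--     step = 1
--
--     while len(res) < rows * cols:
--         if 0 <= r <= rows - 1 and 0 <= c <= cols - 1:
--             res.append((r, c))
--
--         if r + deltar > rStart + step or r + deltar < rStart - step or c + deltac > cStart + step or c + deltac < cStart - step: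
--             if rotateCnt == 4:
--                 step += 1
--                 rotateCnt = 0
--             else:
--                 deltar, deltac = deltac, -deltar
--                 rotateCnt += 1
--
--         r += deltar
--         c += deltac
--     return res
-- ===== SOURCE B (Python) =====
-- def spiralMatrixIII(rows, cols, rStart, cStart):
--     # Walk the spiral ring by ring, clipping each of the four arms of ring k
--     # against the grid, so out-of-grid steps are never visited.
--     if rows <= 0 or cols <= 0:
--         return []
--     res = [(rStart, cStart)] if (0 <= rStart < rows and 0 <= cStart < cols) else []
--     K = max(rStart, rows - 1 - rStart, cStart, cols - 1 - cStart)
--     for k in range(1, K + 1):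
--         if 0 <= cStart + k < cols:   # right edge, top to bottom
--             res += [(r, cStart + k) for r in range(max(rStart - k + 1, 0), min(rStart + k, rows - 1) + 1)]
--         if 0 <= rStart + k < rows:   # bottom edge, right to left
--             res += [(rStart + k, c) for c in range(min(cStart + k - 1, cols - 1), max(cStart - k, 0) - 1, -1)]
--         if 0 <= cStart - k < cols:   # left edge, bottom to top
--             res += [(r, cStart - k) for r in range(min(rStart + k - 1, rows - 1), max(rStart - k, 0) - 1, -1)]
--         if 0 <= rStart - k < rows:   # top edge, left to right
--             res += [(rStart - k, c) for c in range(max(cStart - k + 1, 0), min(cStart + k, cols - 1) + 1)]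
--     return res
-- ===== Notes on version B (the rewrite author's own statement) =====
-- stated objective: faster
-- what changed: Instead of simulating the spiral cell by cell (visiting every cell of the bounding spiral, mostly out of grid), B walks the spiral ring by ring and intersects each of the four arms of a ring with the grid arithmetically, emitting only in-grid cells.
import Mathlib
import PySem

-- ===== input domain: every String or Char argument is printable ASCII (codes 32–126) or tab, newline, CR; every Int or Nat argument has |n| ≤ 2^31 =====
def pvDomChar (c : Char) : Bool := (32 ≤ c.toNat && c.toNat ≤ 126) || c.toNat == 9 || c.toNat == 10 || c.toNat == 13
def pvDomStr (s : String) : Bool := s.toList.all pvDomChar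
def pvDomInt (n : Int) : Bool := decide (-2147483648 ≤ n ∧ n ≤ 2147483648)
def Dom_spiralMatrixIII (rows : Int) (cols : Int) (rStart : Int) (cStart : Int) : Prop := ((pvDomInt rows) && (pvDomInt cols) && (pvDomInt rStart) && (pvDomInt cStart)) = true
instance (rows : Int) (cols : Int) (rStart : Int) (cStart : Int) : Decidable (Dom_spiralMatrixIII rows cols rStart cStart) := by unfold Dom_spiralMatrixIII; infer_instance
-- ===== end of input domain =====

-- B replaces A's cell-by-cell spiral walk by ring-by-ring emission with each arm clipped
-- against the grid arithmetically (objective: faster — it skips all out-of-grid steps).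

-- ===== PORT A =====
-- A's while-loop, with a fuel argument large enough for the loop to finish on every
-- input admitted by Pre_ (proved below); the loop body is A's body, step for step.
def spiralLoopA (rows cols rS cS : Int) : Nat → Int → Int → Int → Int → Int → Int → List (Int × Int) → List (Int × Int)
  | 0, _, _, _, _, _, _, res => res
  | fuel+1, r, c, dr, dc, rot, step, res =>
    if (res.length : Int) < rows * cols then
      let res' := if 0 ≤ r ∧ r ≤ rows - 1 ∧ 0 ≤ c ∧ c ≤ cols - 1 then res ++ [(r, c)] else res
      if r + dr > rS + step ∨ r + dr < rS - step ∨ c + dc > cS + step ∨ c + dc < cS - step then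
        if rot = 4 then spiralLoopA rows cols rS cS fuel (r + dr) (c + dc) dr dc 0 (step + 1) res'
        else spiralLoopA rows cols rS cS fuel (r + dc) (c - dr) dc (-dr) (rot + 1) step res'
      else spiralLoopA rows cols rS cS fuel (r + dr) (c + dc) dr dc rot step res'
    else res

def spiralMatrixIII (rows : Int) (cols : Int) (rStart : Int) (cStart : Int) : List (Int × Int) :=
  let K := (max rStart (max (rows - 1 - rStart) (max cStart (max (cols - 1 - cStart) 1)))).toNat
  spiralLoopA rows cols rStart cStart (4*K*K + 4*K + 2) rStart cStart 0 1 0 1 []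

-- ===== PORT B =====
def spiralMatrixIII_alt (rows : Int) (cols : Int) (rStart : Int) (cStart : Int) : List (Int × Int) :=
  if rows ≤ 0 ∨ cols ≤ 0 then []
  else
    let res0 := if 0 ≤ rStart ∧ rStart < rows ∧ 0 ≤ cStart ∧ cStart < cols then [(rStart, cStart)] else []
    let K := max rStart (max (rows - 1 - rStart) (max cStart (cols - 1 - cStart)))
    (PySem.List.pyRange 1 (K + 1) 1).foldl (fun res k =>
      let res := if 0 ≤ cStart + k ∧ cStart + k < cols then
        res ++ (PySem.List.pyRange (max (rStart - k + 1) 0) (min (rStart + k) (rows - 1) + 1) 1).map (fun r => (r, cStart + k)) else res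
      let res := if 0 ≤ rStart + k ∧ rStart + k < rows then
        res ++ (PySem.List.pyRange (min (cStart + k - 1) (cols - 1)) (max (cStart - k) 0 - 1) (-1)).map (fun c => (rStart + k, c)) else res
      let res := if 0 ≤ cStart - k ∧ cStart - k < cols then
        res ++ (PySem.List.pyRange (min (rStart + k - 1) (rows - 1)) (max (rStart - k) 0 - 1) (-1)).map (fun r => (r, cStart - k)) else res
      let res := if 0 ≤ rStart - k ∧ rStart - k < rows then
        res ++ (PySem.List.pyRange (max (cStart - k + 1) 0) (min (cStart + k) (cols - 1) + 1) 1).map (fun c => (rStart - k, c)) else res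
      res) res0

-- ===== PRECONDITION & SPEC =====
-- A's while-loop never terminates when rows and cols are both negative (then rows*cols > 0
-- but no cell is ever in the grid, so res never grows); Pre_ excludes exactly those inputs.
def Pre_spiralMatrixIII (rows : Int) (cols : Int) (rStart : Int) (cStart : Int) : Prop :=
  0 ≤ rows ∨ 0 ≤ cols
instance (rows : Int) (cols : Int) (rStart : Int) (cStart : Int) : Decidable (Pre_spiralMatrixIII rows cols rStart cStart) := by unfold Pre_spiralMatrixIII; infer_instance
def pvWitness_spiralMatrixIII : Int × Int × Int × Int := (1, 4, 0, 0)

def Spec_spiralMatrixIII (rows : Int) (cols : Int) (rStart : Int) (cStart : Int) (out : List (Int × Int)) : Prop := out = spiralMatrixIII_alt rows cols rStart cStart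
instance (rows : Int) (cols : Int) (rStart : Int) (cStart : Int) (out : List (Int × Int)) : Decidable (Spec_spiralMatrixIII rows cols rStart cStart out) := by unfold Spec_spiralMatrixIII; infer_instance

-- ===== CLAIM (what is proved, stated in full; the proofs are below) =====
def Claim_equal_spiralMatrixIII : Prop := ∀ (rows : Int) (cols : Int) (rStart : Int) (cStart : Int), Dom_spiralMatrixIII rows cols rStart cStart → Pre_spiralMatrixIII rows cols rStart cStart → Spec_spiralMatrixIII rows cols rStart cStart (spiralMatrixIII rows cols rStart cStart)

-- ===== LEMMAS AND PROOFS =====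

-- in-grid test, as a Bool predicate (matches A's append condition)
def inGridB (rows cols : Int) (p : Int × Int) : Bool :=
  decide (0 ≤ p.1 ∧ p.1 ≤ rows - 1 ∧ 0 ≤ p.2 ∧ p.2 ≤ cols - 1)

-- the loop state of A (position, direction, rotation counter, ring radius)
structure SpSt where
  r : Int
  c : Int
  dr : Int
  dc : Int
  rot : Int
  step : Int
deriving DecidableEq, Repr

-- one iteration of A's state update (everything of the loop body except the append)
def spStep (rS cS : Int) (s : SpSt) : SpSt :=
  if s.r + s.dr > rS + s.step ∨ s.r + s.dr < rS - s.step ∨ s.c + s.dc > cS + s.step ∨ s.c + s.dc < cS - s.step then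
    if s.rot = 4 then ⟨s.r + s.dr, s.c + s.dc, s.dr, s.dc, 0, s.step + 1⟩
    else ⟨s.r + s.dc, s.c - s.dr, s.dc, -s.dr, s.rot + 1, s.step⟩
  else ⟨s.r + s.dr, s.c + s.dc, s.dr, s.dc, s.rot, s.step⟩

def spIter (rS cS : Int) : Nat → SpSt → SpSt
  | 0, s => s
  | n+1, s => spIter rS cS n (spStep rS cS s)

-- the positions visited during the next n iterations
def spPos (rS cS : Int) : Nat → SpSt → List (Int × Int)
  | 0, _ => []
  | n+1, s => (s.r, s.c) :: spPos rS cS n (spStep rS cS s)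

lemma spIter_add (rS cS : Int) (m n : Nat) (s : SpSt) :
    spIter rS cS (m + n) s = spIter rS cS n (spIter rS cS m s) := by
  induction m generalizing s with
  | zero => simp [spIter]
  | succ m ih =>
      rw [show m + 1 + n = (m + n) + 1 by omega]
      simp only [spIter]
      exact ih (spStep rS cS s)

lemma spPos_add (rS cS : Int) (m n : Nat) (s : SpSt) :
    spPos rS cS (m + n) s = spPos rS cS m s ++ spPos rS cS n (spIter rS cS m s) := by
  induction m generalizing s with
  | zero => simp [spPos, spIter]
  | succ m ih =>
      have h : m + 1 + n = (m + n) + 1 := by omega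
      rw [h]
      simp only [spPos, spIter]
      rw [ih (spStep rS cS s)]
      simp

-- one unfolding of A's loop, phrased through spStep
lemma spiralLoopA_succ (rows cols rS cS : Int) (fuel : Nat) (s : SpSt) (res : List (Int × Int))
    (h : (res.length : Int) < rows * cols) :
    spiralLoopA rows cols rS cS (fuel + 1) s.r s.c s.dr s.dc s.rot s.step res =
      spiralLoopA rows cols rS cS fuel (spStep rS cS s).r (spStep rS cS s).c (spStep rS cS s).dr
        (spStep rS cS s).dc (spStep rS cS s).rot (spStep rS cS s).step
        (if inGridB rows cols (s.r, s.c) then res ++ [(s.r, s.c)] else res) := by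
  obtain ⟨r, c, dr, dc, rot, step⟩ := s
  simp only [spiralLoopA, spStep, inGridB, decide_eq_true_eq]
  rw [if_pos h]
  split_ifs <;> rfl

lemma spiralLoopA_stop (rows cols rS cS : Int) (fuel : Nat) (r c dr dc rot step : Int)
    (res : List (Int × Int)) (h : rows * cols ≤ (res.length : Int)) :
    spiralLoopA rows cols rS cS fuel r c dr dc rot step res = res := by
  cases fuel with
  | zero => rfl
  | succ fuel => simp only [spiralLoopA]; rw [if_neg (by omega)]

-- the central loop lemma: as long as the in-grid cells still to be appended exactly
-- fill res up to rows*cols, A's loop appends the filtered trajectory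
lemma spiralLoopA_spec (rows cols rS cS : Int) :
    ∀ (n fuel : Nat) (s : SpSt) (res : List (Int × Int)), n ≤ fuel →
      (res.length : Int) + ((spPos rS cS n s).filter (inGridB rows cols)).length = rows * cols →
      spiralLoopA rows cols rS cS fuel s.r s.c s.dr s.dc s.rot s.step res
        = res ++ (spPos rS cS n s).filter (inGridB rows cols) := by
  intro n
  induction n with
  | zero =>
      intro fuel s res _ hinv
      simp only [spPos, List.filter_nil, List.length_nil] at hinv ⊢
      rw [List.append_nil]
      exact spiralLoopA_stop _ _ _ _ _ _ _ _ _ _ _ _ (by omega)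
  | succ n ih =>
      intro fuel s res hfuel hinv
      obtain ⟨fuel, rfl⟩ : ∃ f, fuel = f + 1 := ⟨fuel - 1, by omega⟩
      simp only [spPos, List.filter_cons] at hinv ⊢
      by_cases hin : inGridB rows cols (s.r, s.c) = true
      · simp only [hin, if_true] at hinv ⊢
        have hlt : (res.length : Int) < rows * cols := by
          simp only [List.length_cons] at hinv; push_cast at hinv; omega
        rw [spiralLoopA_succ rows cols rS cS fuel s res hlt, if_pos hin]
        rw [ih fuel (spStep rS cS s) (res ++ [(s.r, s.c)]) (by omega)
          (by simp only [List.length_append, List.length_cons, List.length_nil] at hinv ⊢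
              push_cast at hinv ⊢; omega)]
        simp
      · rw [Bool.not_eq_true] at hin
        simp only [hin, Bool.false_eq_true, if_false] at hinv ⊢
        by_cases h0 : ((spPos rS cS n (spStep rS cS s)).filter (inGridB rows cols)).length = 0
        · rw [List.length_eq_zero_iff] at h0
          rw [h0, List.append_nil]
          refine spiralLoopA_stop _ _ _ _ _ _ _ _ _ _ _ _ ?_
          rw [h0] at hinv; simp only [List.length_nil] at hinv; omega
        · have hlt : (res.length : Int) < rows * cols := by omega
          rw [spiralLoopA_succ rows cols rS cS fuel s res hlt, if_neg (by simp [hin])]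
          exact ih fuel (spStep rS cS s) res (by omega) hinv

-- ===== the spiral trajectory, ring by ring =====

def armR (rS cS k : Int) : List (Int × Int) :=
  (PySem.List.pyRange (rS - k + 1) (rS + k + 1) 1).map (fun x => (x, cS + k))
def armB (rS cS k : Int) : List (Int × Int) :=
  (PySem.List.pyRange (cS + k - 1) (cS - k - 1) (-1)).map (fun x => (rS + k, x))
def armL (rS cS k : Int) : List (Int × Int) :=
  (PySem.List.pyRange (rS + k - 1) (rS - k - 1) (-1)).map (fun x => (x, cS - k))
def armT (rS cS k : Int) : List (Int × Int) :=
  (PySem.List.pyRange (cS - k + 1) (cS + k + 1) 1).map (fun x => (rS - k, x))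

def ringCells (rS cS k : Int) : List (Int × Int) :=
  armR rS cS k ++ armB rS cS k ++ armL rS cS k ++ armT rS cS k

def ringStart (rS cS k : Int) : SpSt := ⟨rS - k + 1, cS + k, 0, 1, 0, k⟩

def pathList (rS cS K : Int) : List (Int × Int) :=
  (rS, cS) :: (PySem.List.pyRange 1 (K + 1) 1).flatMap (ringCells rS cS)

lemma SpSt_mk_eq {a b c d e f a' b' c' d' e' f' : Int} (h1 : a = a') (h2 : b = b')
    (h3 : c = c') (h4 : d = d') (h5 : e = e') (h6 : f = f') :
    (⟨a, b, c, d, e, f⟩ : SpSt) = ⟨a', b', c', d', e', f'⟩ := by subst_vars; rfl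

lemma spPos_one (rS cS : Int) (s : SpSt) : spPos rS cS 1 s = [(s.r, s.c)] := rfl
lemma spIter_one (rS cS : Int) (s : SpSt) : spIter rS cS 1 s = spStep rS cS s := rfl

lemma desc_snoc (a b : Int) (h : b ≤ a) :
    PySem.List.pyRange a (b - 1) (-1) = PySem.List.pyRange a b (-1) ++ [b] := by
  rw [PySem.List.pyRange_neg_one_eq_reverse, PySem.List.pyRange_neg_one_eq_reverse]
  rw [show b - 1 + 1 = b by omega, PySem.List.pyRange_one_cons (by omega), List.reverse_cons]

-- the four straight runs along the arms of ring k
lemma run_down (rS cS k : Int) (hk : 1 ≤ k) :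
    ∀ (n : Nat) (r rot : Int), rS - k ≤ r → r + n = rS + k →
      spPos rS cS n ⟨r, cS + k, 1, 0, rot, k⟩
          = (PySem.List.pyRange r (rS + k) 1).map (fun x => (x, cS + k)) ∧
      spIter rS cS n ⟨r, cS + k, 1, 0, rot, k⟩ = ⟨rS + k, cS + k, 1, 0, rot, k⟩ := by
  intro n
  induction n with
  | zero =>
      intro r rot h1 h2
      obtain rfl : r = rS + k := by push_cast at h2; omega
      exact ⟨by simp [spPos, PySem.List.pyRange_one_eq_nil le_rfl], rfl⟩
  | succ n ih =>
      intro r rot h1 h2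
      push_cast at h2
      have hstep : spStep rS cS ⟨r, cS + k, 1, 0, rot, k⟩ = ⟨r + 1, cS + k, 1, 0, rot, k⟩ := by
        simp only [spStep]
        rw [if_neg (by omega)]
        exact SpSt_mk_eq (by omega) (by omega) (by omega) (by omega) (by omega) (by omega)
      obtain ⟨hpos, hiter⟩ := ih (r + 1) rot (by omega) (by push_cast; omega)
      refine ⟨?_, ?_⟩
      · simp only [spPos, hstep, hpos]
        rw [PySem.List.pyRange_one_cons (show r < rS + k by omega)]
        rfl
      · simp only [spIter, hstep, hiter]

lemma run_left (rS cS k : Int) (hk : 1 ≤ k) :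
    ∀ (n : Nat) (c rot : Int), c ≤ cS + k → c - n = cS - k →
      spPos rS cS n ⟨rS + k, c, 0, -1, rot, k⟩
          = (PySem.List.pyRange c (cS - k) (-1)).map (fun x => (rS + k, x)) ∧
      spIter rS cS n ⟨rS + k, c, 0, -1, rot, k⟩ = ⟨rS + k, cS - k, 0, -1, rot, k⟩ := by
  intro n
  induction n with
  | zero =>
      intro c rot h1 h2
      obtain rfl : c = cS - k := by push_cast at h2; omega
      exact ⟨by simp [spPos, PySem.List.pyRange_neg_one_eq_nil le_rfl], rfl⟩
  | succ n ih =>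
      intro c rot h1 h2
      push_cast at h2
      have hstep : spStep rS cS ⟨rS + k, c, 0, -1, rot, k⟩ = ⟨rS + k, c - 1, 0, -1, rot, k⟩ := by
        simp only [spStep]
        rw [if_neg (by omega)]
        exact SpSt_mk_eq (by omega) (by omega) (by omega) (by omega) (by omega) (by omega)
      obtain ⟨hpos, hiter⟩ := ih (c - 1) rot (by omega) (by push_cast; omega)
      refine ⟨?_, ?_⟩
      · simp only [spPos, hstep, hpos]
        rw [PySem.List.pyRange_neg_one_cons (show cS - k < c by omega)]
        rfl
      · simp only [spIter, hstep, hiter]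

lemma run_up (rS cS k : Int) (hk : 1 ≤ k) :
    ∀ (n : Nat) (r rot : Int), r ≤ rS + k → r - n = rS - k →
      spPos rS cS n ⟨r, cS - k, -1, 0, rot, k⟩
          = (PySem.List.pyRange r (rS - k) (-1)).map (fun x => (x, cS - k)) ∧
      spIter rS cS n ⟨r, cS - k, -1, 0, rot, k⟩ = ⟨rS - k, cS - k, -1, 0, rot, k⟩ := by
  intro n
  induction n with
  | zero =>
      intro r rot h1 h2
      obtain rfl : r = rS - k := by push_cast at h2; omega
      exact ⟨by simp [spPos, PySem.List.pyRange_neg_one_eq_nil le_rfl], rfl⟩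
  | succ n ih =>
      intro r rot h1 h2
      push_cast at h2
      have hstep : spStep rS cS ⟨r, cS - k, -1, 0, rot, k⟩ = ⟨r - 1, cS - k, -1, 0, rot, k⟩ := by
        simp only [spStep]
        rw [if_neg (by omega)]
        exact SpSt_mk_eq (by omega) (by omega) (by omega) (by omega) (by omega) (by omega)
      obtain ⟨hpos, hiter⟩ := ih (r - 1) rot (by omega) (by push_cast; omega)
      refine ⟨?_, ?_⟩
      · simp only [spPos, hstep, hpos]
        rw [PySem.List.pyRange_neg_one_cons (show rS - k < r by omega)]
        rfl
      · simp only [spIter, hstep, hiter]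

lemma run_right (rS cS k : Int) (hk : 1 ≤ k) :
    ∀ (n : Nat) (c rot : Int), cS - k ≤ c → c + n = cS + k →
      spPos rS cS n ⟨rS - k, c, 0, 1, rot, k⟩
          = (PySem.List.pyRange c (cS + k) 1).map (fun x => (rS - k, x)) ∧
      spIter rS cS n ⟨rS - k, c, 0, 1, rot, k⟩ = ⟨rS - k, cS + k, 0, 1, rot, k⟩ := by
  intro n
  induction n with
  | zero =>
      intro c rot h1 h2
      obtain rfl : c = cS + k := by push_cast at h2; omega
      exact ⟨by simp [spPos, PySem.List.pyRange_one_eq_nil le_rfl], rfl⟩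
  | succ n ih =>
      intro c rot h1 h2
      push_cast at h2
      have hstep : spStep rS cS ⟨rS - k, c, 0, 1, rot, k⟩ = ⟨rS - k, c + 1, 0, 1, rot, k⟩ := by
        simp only [spStep]
        rw [if_neg (by omega)]
        exact SpSt_mk_eq (by omega) (by omega) (by omega) (by omega) (by omega) (by omega)
      obtain ⟨hpos, hiter⟩ := ih (c + 1) rot (by omega) (by push_cast; omega)
      refine ⟨?_, ?_⟩
      · simp only [spPos, hstep, hpos]
        rw [PySem.List.pyRange_one_cons (show c < cS + k by omega)]
        rfl
      · simp only [spIter, hstep, hiter]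

lemma seg_comp {rS cS : Int} {m n : Nat} {s s' s'' : SpSt} {l l' : List (Int × Int)}
    (h1 : spPos rS cS m s = l ∧ spIter rS cS m s = s')
    (h2 : spPos rS cS n s' = l' ∧ spIter rS cS n s' = s'') :
    spPos rS cS (m + n) s = l ++ l' ∧ spIter rS cS (m + n) s = s'' := by
  rw [spPos_add, spIter_add, h1.1, h1.2, h2.1, h2.2]
  exact ⟨rfl, rfl⟩

lemma seg_one {rS cS : Int} {s s' : SpSt} (h : spStep rS cS s = s') :
    spPos rS cS 1 s = [(s.r, s.c)] ∧ spIter rS cS 1 s = s' := by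
  rw [spPos_one, spIter_one, h]
  exact ⟨rfl, rfl⟩

-- one full ring of the trajectory
lemma ring_spec (rS cS k : Int) (hk : 1 ≤ k) :
    spPos rS cS (8 * k).toNat (ringStart rS cS k) = ringCells rS cS k ∧
    spIter rS cS (8 * k).toNat (ringStart rS cS k) = ringStart rS cS (k + 1) := by
  have step0 : spStep rS cS (ringStart rS cS k) = ⟨rS - k + 2, cS + k, 1, 0, 1, k⟩ := by
    simp only [ringStart, spStep]
    rw [if_pos (by omega), if_neg (by omega)]
    exact SpSt_mk_eq (by omega) (by omega) (by omega) (by omega) (by omega) (by omega)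
  have step2 : spStep rS cS ⟨rS + k, cS + k, 1, 0, 1, k⟩ = ⟨rS + k, cS + k - 1, 0, -1, 2, k⟩ := by
    simp only [spStep]
    rw [if_pos (by omega), if_neg (by omega)]
    exact SpSt_mk_eq (by omega) (by omega) (by omega) (by omega) (by omega) (by omega)
  have step4 : spStep rS cS ⟨rS + k, cS - k, 0, -1, 2, k⟩ = ⟨rS + k - 1, cS - k, -1, 0, 3, k⟩ := by
    simp only [spStep]
    rw [if_pos (by omega), if_neg (by omega)]
    exact SpSt_mk_eq (by omega) (by omega) (by omega) (by omega) (by omega) (by omega)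
  have step6 : spStep rS cS ⟨rS - k, cS - k, -1, 0, 3, k⟩ = ⟨rS - k, cS - k + 1, 0, 1, 4, k⟩ := by
    simp only [spStep]
    rw [if_pos (by omega), if_neg (by omega)]
    exact SpSt_mk_eq (by omega) (by omega) (by omega) (by omega) (by omega) (by omega)
  have step8 : spStep rS cS ⟨rS - k, cS + k, 0, 1, 4, k⟩ = ringStart rS cS (k + 1) := by
    simp only [spStep, ringStart]
    rw [if_pos (by omega), if_pos trivial]
    exact SpSt_mk_eq (by omega) (by omega) (by omega) (by omega) (by omega) (by omega)
  obtain ⟨run1p, run1i⟩ := run_down rS cS k hk (2*k-2).toNat (rS - k + 2) 1 (by omega) (by omega)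
  obtain ⟨run3p, run3i⟩ := run_left rS cS k hk (2*k-1).toNat (cS + k - 1) 2 (by omega) (by omega)
  obtain ⟨run5p, run5i⟩ := run_up rS cS k hk (2*k-1).toNat (rS + k - 1) 3 (by omega) (by omega)
  obtain ⟨run7p, run7i⟩ := run_right rS cS k hk (2*k-1).toNat (cS - k + 1) 4 (by omega) (by omega)
  have C := seg_comp (seg_one step0) (seg_comp ⟨run1p, run1i⟩ (seg_comp (seg_one step2)
    (seg_comp ⟨run3p, run3i⟩ (seg_comp (seg_one step4) (seg_comp ⟨run5p, run5i⟩
      (seg_comp (seg_one step6) (seg_comp ⟨run7p, run7i⟩ (seg_one step8))))))))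
  have hsplit : (8*k).toNat
      = 1 + ((2*k-2).toNat + (1 + ((2*k-1).toNat + (1 + ((2*k-1).toNat + (1 + ((2*k-1).toNat + 1))))))) := by
    omega
  rw [hsplit]
  refine ⟨?_, C.2⟩
  rw [C.1]
  have eR : armR rS cS k
      = (rS - k + 1, cS + k) :: ((PySem.List.pyRange (rS - k + 2) (rS + k) 1).map (fun x => (x, cS + k)) ++ [(rS + k, cS + k)]) := by
    rw [armR, PySem.List.pyRange_one_cons (show rS - k + 1 < rS + k + 1 by omega),
        show rS + k + 1 = (rS + k) + 1 from rfl,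
        PySem.List.pyRange_one_succ_right (by omega)]
    simp [show rS - k + 1 + 1 = rS - k + 2 by omega]
  have eB : armB rS cS k
      = (PySem.List.pyRange (cS + k - 1) (cS - k) (-1)).map (fun x => (rS + k, x)) ++ [(rS + k, cS - k)] := by
    rw [armB, show cS - k - 1 = (cS - k) - 1 from rfl, desc_snoc _ _ (by omega)]
    simp
  have eL : armL rS cS k
      = (PySem.List.pyRange (rS + k - 1) (rS - k) (-1)).map (fun x => (x, cS - k)) ++ [(rS - k, cS - k)] := by
    rw [armL, show rS - k - 1 = (rS - k) - 1 from rfl, desc_snoc _ _ (by omega)]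
    simp
  have eT : armT rS cS k
      = (PySem.List.pyRange (cS - k + 1) (cS + k) 1).map (fun x => (rS - k, x)) ++ [(rS - k, cS + k)] := by
    rw [armT, show cS + k + 1 = (cS + k) + 1 from rfl, PySem.List.pyRange_one_succ_right (by omega)]
    simp
  rw [ringCells, eR, eB, eL, eT, ringStart]
  simp [List.append_assoc]

-- the whole trajectory through K rings
lemma path_spec (rS cS : Int) : ∀ K : Nat,
    spPos rS cS (4*K*K + 4*K) (ringStart rS cS 1) = (PySem.List.pyRange 1 ((K:Int) + 1) 1).flatMap (ringCells rS cS) ∧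
    spIter rS cS (4*K*K + 4*K) (ringStart rS cS 1) = ringStart rS cS ((K:Int) + 1) := by
  intro K
  induction K with
  | zero => simp [spPos, spIter, PySem.List.pyRange_one_eq_nil le_rfl]
  | succ K ih =>
      obtain ⟨hp, hi⟩ := ring_spec rS cS ((K:Int) + 1) (by omega)
      rw [← show (8*K+8 : Nat) = (8*((K:Int)+1)).toNat by omega] at hp hi
      have C := seg_comp ih ⟨hp, hi⟩
      have hsplit : 4*(K+1)*(K+1) + 4*(K+1) = (4*K*K + 4*K) + (8*K+8) := by ring
      rw [hsplit]
      refine ⟨?_, by rw [C.2]; congr 1⟩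
      rw [C.1]
      conv_rhs => rw [show ((K+1 : Nat) : Int) + 1 = ((K:Int) + 1) + 1 by push_cast; ring,
        PySem.List.pyRange_one_succ_right (show (1:Int) ≤ (K:Int) + 1 by omega), List.flatMap_append]
      simp

lemma path_pos (rS cS : Int) (K : Nat) :
    spPos rS cS (1 + (4*K*K + 4*K)) ⟨rS, cS, 0, 1, 0, 1⟩ = pathList rS cS (K : Int) := by
  have h0 : spStep rS cS ⟨rS, cS, 0, 1, 0, 1⟩ = ringStart rS cS 1 := by
    simp only [spStep, ringStart]
    rw [if_neg (by omega)]
    exact SpSt_mk_eq (by omega) (by omega) (by omega) (by omega) (by omega) (by omega)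
  rw [spPos_add rS cS 1 (4*K*K + 4*K), spPos_one, spIter_one, h0, (path_spec rS cS K).1, pathList]
  simp

-- ===== membership, nodup, coverage of the trajectory =====

lemma mem_armR {rS cS k : Int} {p : Int × Int} :
    p ∈ armR rS cS k ↔ p.2 = cS + k ∧ rS - k + 1 ≤ p.1 ∧ p.1 ≤ rS + k := by
  obtain ⟨a, b⟩ := p
  simp only [armR, List.mem_map, PySem.List.mem_pyRange_one, Prod.mk.injEq]
  constructor
  · rintro ⟨x, hx, rfl, rfl⟩; omega
  · rintro ⟨rfl, h1, h2⟩; exact ⟨a, by omega, rfl, rfl⟩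

lemma mem_armB {rS cS k : Int} {p : Int × Int} :
    p ∈ armB rS cS k ↔ p.1 = rS + k ∧ cS - k ≤ p.2 ∧ p.2 ≤ cS + k - 1 := by
  obtain ⟨a, b⟩ := p
  simp only [armB, List.mem_map, PySem.List.mem_pyRange_neg_one, Prod.mk.injEq]
  constructor
  · rintro ⟨x, hx, rfl, rfl⟩; omega
  · rintro ⟨rfl, h1, h2⟩; exact ⟨b, by omega, rfl, rfl⟩

lemma mem_armL {rS cS k : Int} {p : Int × Int} :
    p ∈ armL rS cS k ↔ p.2 = cS - k ∧ rS - k ≤ p.1 ∧ p.1 ≤ rS + k - 1 := by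
  obtain ⟨a, b⟩ := p
  simp only [armL, List.mem_map, PySem.List.mem_pyRange_neg_one, Prod.mk.injEq]
  constructor
  · rintro ⟨x, hx, rfl, rfl⟩; omega
  · rintro ⟨rfl, h1, h2⟩; exact ⟨a, by omega, rfl, rfl⟩

lemma mem_armT {rS cS k : Int} {p : Int × Int} :
    p ∈ armT rS cS k ↔ p.1 = rS - k ∧ cS - k + 1 ≤ p.2 ∧ p.2 ≤ cS + k := by
  obtain ⟨a, b⟩ := p
  simp only [armT, List.mem_map, PySem.List.mem_pyRange_one, Prod.mk.injEq]
  constructor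
  · rintro ⟨x, hx, rfl, rfl⟩; omega
  · rintro ⟨rfl, h1, h2⟩; exact ⟨b, by omega, rfl, rfl⟩

lemma mem_ringCells {rS cS k : Int} {p : Int × Int} :
    p ∈ ringCells rS cS k ↔
      ((p.2 = cS + k ∧ rS - k + 1 ≤ p.1 ∧ p.1 ≤ rS + k) ∨
       (p.1 = rS + k ∧ cS - k ≤ p.2 ∧ p.2 ≤ cS + k - 1) ∨
       (p.2 = cS - k ∧ rS - k ≤ p.1 ∧ p.1 ≤ rS + k - 1) ∨
       (p.1 = rS - k ∧ cS - k + 1 ≤ p.2 ∧ p.2 ≤ cS + k)) := by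
  simp [ringCells, List.mem_append, mem_armR, mem_armB, mem_armL, mem_armT]

lemma ring_nodup (rS cS k : Int) (hk : 1 ≤ k) : (ringCells rS cS k).Nodup := by
  have injR : Function.Injective (fun x : Int => (x, cS + k)) := fun x y h => by simpa using h
  have injB : Function.Injective (fun x : Int => (rS + k, x)) := fun x y h => by simpa using h
  have injL : Function.Injective (fun x : Int => (x, cS - k)) := fun x y h => by simpa using h
  have injT : Function.Injective (fun x : Int => (rS - k, x)) := fun x y h => by simpa using h
  have nR : (armR rS cS k).Nodup := List.Nodup.map injR (PySem.List.nodup_pyRange_one _ _)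
  have nB : (armB rS cS k).Nodup := by
    rw [armB, PySem.List.pyRange_neg_one_eq_reverse]
    exact List.Nodup.map injB (List.nodup_reverse.mpr (PySem.List.nodup_pyRange_one _ _))
  have nL : (armL rS cS k).Nodup := by
    rw [armL, PySem.List.pyRange_neg_one_eq_reverse]
    exact List.Nodup.map injL (List.nodup_reverse.mpr (PySem.List.nodup_pyRange_one _ _))
  have nT : (armT rS cS k).Nodup := List.Nodup.map injT (PySem.List.nodup_pyRange_one _ _)
  rw [ringCells]
  refine List.nodup_append.mpr ⟨List.nodup_append.mpr ⟨List.nodup_append.mpr ⟨nR, nB, ?_⟩, nL, ?_⟩, nT, ?_⟩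
  · intro a ha b hb
    rw [mem_armR] at ha; rw [mem_armB] at hb
    intro h; subst h; omega
  · intro a ha b hb
    rw [List.mem_append, mem_armR, mem_armB] at ha; rw [mem_armL] at hb
    intro h; subst h; omega
  · intro a ha b hb
    rw [List.mem_append, List.mem_append, mem_armR, mem_armB, mem_armL] at ha; rw [mem_armT] at hb
    intro h; subst h; omega

lemma rings_nodup (rS cS : Int) : ∀ K : Nat,
    ((PySem.List.pyRange 1 ((K : Int) + 1) 1).flatMap (ringCells rS cS)).Nodup := by
  intro K
  induction K with
  | zero => simp [PySem.List.pyRange_one_eq_nil le_rfl]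
  | succ K ih =>
      rw [show ((K + 1 : Nat) : Int) + 1 = ((K : Int) + 1) + 1 by push_cast; ring,
          PySem.List.pyRange_one_succ_right (show (1:Int) ≤ (K : Int) + 1 by omega), List.flatMap_append]
      refine List.nodup_append.mpr ⟨ih, by simpa using ring_nodup rS cS ((K : Int) + 1) (by omega), ?_⟩
      intro a ha b hb
      obtain ⟨k', hk', hak'⟩ := List.mem_flatMap.mp ha
      rw [PySem.List.mem_pyRange_one] at hk'
      rw [mem_ringCells] at hak'
      simp only [List.flatMap_cons, List.flatMap_nil, List.append_nil] at hb
      rw [mem_ringCells] at hb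
      intro h; subst h; omega

lemma path_nodup (rS cS : Int) (K : Int) (hK : 0 ≤ K) : (pathList rS cS K).Nodup := by
  rw [pathList, List.nodup_cons]
  constructor
  · intro hmem
    obtain ⟨k', hk', hak'⟩ := List.mem_flatMap.mp hmem
    rw [PySem.List.mem_pyRange_one] at hk'
    rw [mem_ringCells] at hak'
    simp only at hak'
    omega
  · have := rings_nodup rS cS K.toNat
    rwa [show ((K.toNat : Nat) : Int) = K by omega] at this

lemma mem_ring_of {rS cS k : Int} {p : Int × Int} (hk : 1 ≤ k)
    (hb : -k ≤ p.1 - rS ∧ p.1 - rS ≤ k ∧ -k ≤ p.2 - cS ∧ p.2 - cS ≤ k)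
    (ha : p.1 - rS = k ∨ p.1 - rS = -k ∨ p.2 - cS = k ∨ p.2 - cS = -k) :
    p ∈ ringCells rS cS k := by
  rw [mem_ringCells]; omega

lemma path_covers {rows cols rS cS K : Int}
    (h1 : rS ≤ K) (h2 : rows - 1 - rS ≤ K) (h3 : cS ≤ K) (h4 : cols - 1 - cS ≤ K)
    {p : Int × Int} (hg : 0 ≤ p.1 ∧ p.1 ≤ rows - 1 ∧ 0 ≤ p.2 ∧ p.2 ≤ cols - 1) :
    p ∈ pathList rS cS K := by
  rw [pathList]
  by_cases h0 : p = (rS, cS)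
  · subst h0; exact List.mem_cons_self
  · have hne : ¬(p.1 = rS ∧ p.2 = cS) := by
      intro ⟨ha, hb⟩; exact h0 (Prod.ext ha hb)
    set k := max (p.1 - rS) (max (rS - p.1) (max (p.2 - cS) (cS - p.2))) with hkdef
    refine List.mem_cons_of_mem _ (List.mem_flatMap.mpr ⟨k, ?_, ?_⟩)
    · exact PySem.List.mem_pyRange_one.mpr ⟨by omega, by omega⟩
    · exact mem_ring_of (by omega) (by omega) (by omega)

-- ===== the grid as a list, and the counting argument =====

def gridList (rows cols : Int) : List (Int × Int) :=
  (PySem.List.pyRange 0 rows 1) ×ˢ (PySem.List.pyRange 0 cols 1)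

lemma mem_gridList {rows cols : Int} {p : Int × Int} :
    p ∈ gridList rows cols ↔ (0 ≤ p.1 ∧ p.1 ≤ rows - 1 ∧ 0 ≤ p.2 ∧ p.2 ≤ cols - 1) := by
  obtain ⟨a, b⟩ := p
  rw [gridList, List.mem_product]
  simp only [PySem.List.mem_pyRange_one]
  omega

lemma nodup_gridList (rows cols : Int) : (gridList rows cols).Nodup :=
  List.Nodup.product (PySem.List.nodup_pyRange_one _ _) (PySem.List.nodup_pyRange_one _ _)

lemma length_gridList (rows cols : Int) (hr : 1 ≤ rows) (hc : 1 ≤ cols) :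
    ((gridList rows cols).length : Int) = rows * cols := by
  rw [gridList, List.length_product, PySem.List.length_pyRange_one, PySem.List.length_pyRange_one]
  push_cast
  rw [Int.toNat_of_nonneg (by omega), Int.toNat_of_nonneg (by omega)]
  ring

lemma filter_path_length {rows cols rS cS K : Int} (hr : 1 ≤ rows) (hc : 1 ≤ cols)
    (h1 : rS ≤ K) (h2 : rows - 1 - rS ≤ K) (h3 : cS ≤ K) (h4 : cols - 1 - cS ≤ K) :
    (((pathList rS cS K).filter (inGridB rows cols)).length : Int) = rows * cols := by
  have hK : 0 ≤ K := by omega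
  have hnd : ((pathList rS cS K).filter (inGridB rows cols)).Nodup :=
    List.Nodup.filter _ (path_nodup rS cS K hK)
  have sub1 : (pathList rS cS K).filter (inGridB rows cols) ⊆ gridList rows cols := by
    intro x hx
    obtain ⟨-, hq⟩ := List.mem_filter.mp hx
    exact mem_gridList.mpr (by simpa [inGridB] using hq)
  have sub2 : gridList rows cols ⊆ (pathList rS cS K).filter (inGridB rows cols) := by
    intro x hx
    have hg := mem_gridList.mp hx
    exact List.mem_filter.mpr ⟨path_covers h1 h2 h3 h4 hg, by simpa [inGridB] using hg⟩
  have hlen : ((pathList rS cS K).filter (inGridB rows cols)).length = (gridList rows cols).length :=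
    le_antisymm ((hnd.subperm sub1).length_le) (((nodup_gridList rows cols).subperm sub2).length_le)
  rw [hlen, length_gridList rows cols hr hc]

-- ===== rings beyond all bounds contain no grid cell =====

lemma path_filter_stable {rows cols rS cS K1 K2 : Int} (h0 : 0 ≤ K1) (hle : K1 ≤ K2)
    (h1 : rS ≤ K1) (h2 : rows - 1 - rS ≤ K1) (h3 : cS ≤ K1) (h4 : cols - 1 - cS ≤ K1) :
    (pathList rS cS K2).filter (inGridB rows cols) = (pathList rS cS K1).filter (inGridB rows cols) := by
  rw [pathList, pathList, PySem.List.pyRange_one_append 1 (K1 + 1) (K2 + 1) (by omega) (by omega),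
      List.flatMap_append]
  have hnil : ((PySem.List.pyRange (K1 + 1) (K2 + 1) 1).flatMap (ringCells rS cS)).filter (inGridB rows cols) = [] := by
    rw [List.filter_eq_nil_iff]
    intro a ha
    obtain ⟨k, hk, hak⟩ := List.mem_flatMap.mp ha
    rw [PySem.List.mem_pyRange_one] at hk
    rw [mem_ringCells] at hak
    simp only [inGridB, decide_eq_true_eq]
    omega
  simp [List.filter_cons, List.filter_append, hnil]

-- ===== clipping an arm against the grid = filtering it =====

lemma pyRange_filter_asc (q : Int → Bool) (lo hi : Int) :
    ∀ (n : Nat) (a b : Int), b - a ≤ n → (∀ x, a ≤ x → x < b → q x = decide (lo ≤ x ∧ x < hi)) →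
      (PySem.List.pyRange a b 1).filter q = PySem.List.pyRange (max a lo) (min b hi) 1 := by
  intro n
  induction n with
  | zero =>
      intro a b hab _
      rw [PySem.List.pyRange_one_eq_nil (by omega), List.filter_nil,
          Eq.comm, PySem.List.pyRange_one_eq_nil (by omega)]
  | succ n ih =>
      intro a b hab hq
      by_cases hba : b ≤ a
      · rw [PySem.List.pyRange_one_eq_nil hba, List.filter_nil,
            Eq.comm, PySem.List.pyRange_one_eq_nil (by omega)]
      · rw [PySem.List.pyRange_one_cons (show a < b by omega), List.filter_cons,
            hq a le_rfl (by omega), ih (a + 1) b (by omega) (fun x hx1 hx2 => hq x (by omega) hx2)]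
        by_cases hin : lo ≤ a ∧ a < hi
        · rw [if_pos (by simpa using hin)]
          rw [show max a lo = a by omega]
          rw [PySem.List.pyRange_one_cons (show a < min b hi by omega)]
          rw [show max (a + 1) lo = a + 1 by omega]
        · rw [if_neg (by simpa using hin)]
          rcases lt_or_ge a lo with h | h
          · rw [show max (a + 1) lo = max a lo by omega]
          · rw [PySem.List.pyRange_one_eq_nil (show min b hi ≤ max (a + 1) lo by omega),
                Eq.comm, PySem.List.pyRange_one_eq_nil (show min b hi ≤ max a lo by omega)]

lemma pyRange_filter_desc (q : Int → Bool) (lo hi a b : Int)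
    (hq : ∀ x, b < x → x ≤ a → q x = decide (lo ≤ x ∧ x < hi)) :
    (PySem.List.pyRange a b (-1)).filter q
      = PySem.List.pyRange (min (a + 1) hi - 1) (max (b + 1) lo - 1) (-1) := by
  rw [PySem.List.pyRange_neg_one_eq_reverse, List.filter_reverse,
      pyRange_filter_asc q lo hi ((a + 1) - (b + 1)).toNat (b + 1) (a + 1) (by omega)
        (fun x hx1 hx2 => hq x (by omega) (by omega)),
      PySem.List.pyRange_neg_one_eq_reverse,
      show min (a + 1) hi - 1 + 1 = min (a + 1) hi by omega,
      show max (b + 1) lo - 1 + 1 = max (b + 1) lo by omega]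

-- the ring k clipped against the grid, exactly as B computes it
def clipRing (rows cols rS cS k : Int) : List (Int × Int) :=
  (if 0 ≤ cS + k ∧ cS + k < cols then
     (PySem.List.pyRange (max (rS - k + 1) 0) (min (rS + k) (rows - 1) + 1) 1).map (fun x => (x, cS + k)) else [])
  ++ ((if 0 ≤ rS + k ∧ rS + k < rows then
     (PySem.List.pyRange (min (cS + k - 1) (cols - 1)) (max (cS - k) 0 - 1) (-1)).map (fun x => (rS + k, x)) else [])
  ++ ((if 0 ≤ cS - k ∧ cS - k < cols then
     (PySem.List.pyRange (min (rS + k - 1) (rows - 1)) (max (rS - k) 0 - 1) (-1)).map (fun x => (x, cS - k)) else [])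
  ++ (if 0 ≤ rS - k ∧ rS - k < rows then
     (PySem.List.pyRange (max (cS - k + 1) 0) (min (cS + k) (cols - 1) + 1) 1).map (fun x => (rS - k, x)) else [])))

lemma clip_ring_eq_filter (rows cols rS cS k : Int) :
    (ringCells rS cS k).filter (inGridB rows cols) = clipRing rows cols rS cS k := by
  rw [ringCells, clipRing, List.append_assoc, List.append_assoc, List.filter_append,
      List.filter_append, List.filter_append]
  have eR : (armR rS cS k).filter (inGridB rows cols)
      = (if 0 ≤ cS + k ∧ cS + k < cols then
          (PySem.List.pyRange (max (rS - k + 1) 0) (min (rS + k) (rows - 1) + 1) 1).map (fun x => (x, cS + k)) else []) := by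
    by_cases hc : 0 ≤ cS + k ∧ cS + k < cols
    · rw [if_pos hc, armR, List.filter_map,
          pyRange_filter_asc _ 0 rows ((rS + k + 1) - (rS - k + 1)).toNat _ _ (by omega)
            (fun x _ _ => by simp only [Function.comp, inGridB]; exact decide_eq_decide.mpr (by omega))]
      rw [show min (rS + k + 1) rows = min (rS + k) (rows - 1) + 1 by omega]
    · rw [if_neg hc, List.filter_eq_nil_iff]
      intro p hp
      rw [mem_armR] at hp
      simp only [inGridB, decide_eq_true_eq]
      omega
  have eB : (armB rS cS k).filter (inGridB rows cols)
      = (if 0 ≤ rS + k ∧ rS + k < rows then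
          (PySem.List.pyRange (min (cS + k - 1) (cols - 1)) (max (cS - k) 0 - 1) (-1)).map (fun x => (rS + k, x)) else []) := by
    by_cases hc : 0 ≤ rS + k ∧ rS + k < rows
    · rw [if_pos hc, armB, List.filter_map,
          pyRange_filter_desc _ 0 cols _ _
            (fun x _ _ => by simp only [Function.comp, inGridB]; exact decide_eq_decide.mpr (by omega))]
      rw [show min (cS + k - 1 + 1) cols - 1 = min (cS + k - 1) (cols - 1) by omega,
          show max (cS - k - 1 + 1) 0 - 1 = max (cS - k) 0 - 1 by omega]
    · rw [if_neg hc, List.filter_eq_nil_iff]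
      intro p hp
      rw [mem_armB] at hp
      simp only [inGridB, decide_eq_true_eq]
      omega
  have eL : (armL rS cS k).filter (inGridB rows cols)
      = (if 0 ≤ cS - k ∧ cS - k < cols then
          (PySem.List.pyRange (min (rS + k - 1) (rows - 1)) (max (rS - k) 0 - 1) (-1)).map (fun x => (x, cS - k)) else []) := by
    by_cases hc : 0 ≤ cS - k ∧ cS - k < cols
    · rw [if_pos hc, armL, List.filter_map,
          pyRange_filter_desc _ 0 rows _ _
            (fun x _ _ => by simp only [Function.comp, inGridB]; exact decide_eq_decide.mpr (by omega))]
      rw [show min (rS + k - 1 + 1) rows - 1 = min (rS + k - 1) (rows - 1) by omega,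
          show max (rS - k - 1 + 1) 0 - 1 = max (rS - k) 0 - 1 by omega]
    · rw [if_neg hc, List.filter_eq_nil_iff]
      intro p hp
      rw [mem_armL] at hp
      simp only [inGridB, decide_eq_true_eq]
      omega
  have eT : (armT rS cS k).filter (inGridB rows cols)
      = (if 0 ≤ rS - k ∧ rS - k < rows then
          (PySem.List.pyRange (max (cS - k + 1) 0) (min (cS + k) (cols - 1) + 1) 1).map (fun x => (rS - k, x)) else []) := by
    by_cases hc : 0 ≤ rS - k ∧ rS - k < rows
    · rw [if_pos hc, armT, List.filter_map,
          pyRange_filter_asc _ 0 cols ((cS + k + 1) - (cS - k + 1)).toNat _ _ (by omega)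
            (fun x _ _ => by simp only [Function.comp, inGridB]; exact decide_eq_decide.mpr (by omega))]
      rw [show min (cS + k + 1) cols = min (cS + k) (cols - 1) + 1 by omega]
    · rw [if_neg hc, List.filter_eq_nil_iff]
      intro p hp
      rw [mem_armT] at hp
      simp only [inGridB, decide_eq_true_eq]
      omega
  rw [eR, eB, eL, eT]

lemma append_ite {α : Type} (c : Prop) [Decidable c] (acc X : List α) :
    (if c then acc ++ X else acc) = acc ++ (if c then X else []) := by
  split_ifs <;> simp

lemma flatMap_filter {α β : Type} (l : List α) (f : α → List β) (q : β → Bool) :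
    (l.flatMap f).filter q = l.flatMap (fun k => (f k).filter q) := by
  induction l with
  | nil => rfl
  | cons x l ih => simp [List.flatMap_cons, List.filter_append, ih]

-- B computes exactly the grid-filtered trajectory through its rings
lemma alt_eq_filter (rows cols rS cS : Int) (hr : 1 ≤ rows) (hc : 1 ≤ cols) :
    spiralMatrixIII_alt rows cols rS cS
      = (pathList rS cS (max rS (max (rows - 1 - rS) (max cS (cols - 1 - cS))))).filter (inGridB rows cols) := by
  rw [spiralMatrixIII_alt, if_neg (by omega)]
  have hbody : (fun (res : List (Int × Int)) (k : Int) =>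
      let res := if 0 ≤ cS + k ∧ cS + k < cols then
        res ++ (PySem.List.pyRange (max (rS - k + 1) 0) (min (rS + k) (rows - 1) + 1) 1).map (fun r => (r, cS + k)) else res
      let res := if 0 ≤ rS + k ∧ rS + k < rows then
        res ++ (PySem.List.pyRange (min (cS + k - 1) (cols - 1)) (max (cS - k) 0 - 1) (-1)).map (fun c => (rS + k, c)) else res
      let res := if 0 ≤ cS - k ∧ cS - k < cols then
        res ++ (PySem.List.pyRange (min (rS + k - 1) (rows - 1)) (max (rS - k) 0 - 1) (-1)).map (fun r => (r, cS - k)) else res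
      let res := if 0 ≤ rS - k ∧ rS - k < rows then
        res ++ (PySem.List.pyRange (max (cS - k + 1) 0) (min (cS + k) (cols - 1) + 1) 1).map (fun c => (rS - k, c)) else res
      res) = fun res k => res ++ clipRing rows cols rS cS k := by
    funext res k
    simp only [clipRing, append_ite, List.append_assoc]
    split_ifs <;> simp [List.append_assoc]
  rw [hbody, PySem.List.foldl_append_eq_flatMap]
  rw [pathList, List.filter_cons]
  have hhead : (if 0 ≤ rS ∧ rS < rows ∧ 0 ≤ cS ∧ cS < cols then [(rS, cS)] else [])
      = (if inGridB rows cols (rS, cS) = true then (rS, cS) :: [] else []) := by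
    simp only [inGridB, decide_eq_true_eq]
    split_ifs with h1 h2 <;> first | rfl | omega
  rw [hhead, flatMap_filter, List.flatMap_congr (fun k _ => clip_ring_eq_filter rows cols rS cS k)]
  split_ifs <;> simp

-- ===== VERDICT (by name: the statement is the Claim_ definition above) =====
theorem spiralMatrixIII_spec : Claim_equal_spiralMatrixIII := by
  unfold Claim_equal_spiralMatrixIII
  intro rows cols rS cS _ hpre
  unfold Spec_spiralMatrixIII
  by_cases hmain : 1 ≤ rows ∧ 1 ≤ cols
  · obtain ⟨hr, hc⟩ := hmain
    set KA : Int := max rS (max (rows - 1 - rS) (max cS (max (cols - 1 - cS) 1))) with hKAdef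
    set KB : Int := max rS (max (rows - 1 - rS) (max cS (cols - 1 - cS))) with hKBdef
    set K : Nat := KA.toNat with hKdef
    have hKA1 : 1 ≤ KA := by omega
    have hKcast : (K : Int) = KA := by omega
    have hA : spiralMatrixIII rows cols rS cS = (pathList rS cS (K : Int)).filter (inGridB rows cols) := by
      show spiralLoopA rows cols rS cS (4*K*K + 4*K + 2) rS cS 0 1 0 1 [] = _
      have hinv : ((([] : List (Int × Int)).length : Int)
          + ((spPos rS cS (1 + (4*K*K + 4*K)) ⟨rS, cS, 0, 1, 0, 1⟩).filter (inGridB rows cols)).length = rows * cols) := by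
        rw [path_pos rS cS K]
        have hcount := filter_path_length (K := (K : Int)) (rS := rS) (cS := cS) hr hc
          (by omega) (by omega) (by omega) (by omega)
        simp only [List.length_nil, Int.natCast_zero, zero_add]
        exact hcount
      have h := spiralLoopA_spec rows cols rS cS (1 + (4*K*K + 4*K)) (4*K*K + 4*K + 2)
        ⟨rS, cS, 0, 1, 0, 1⟩ [] (by omega) hinv
      rw [path_pos rS cS K] at h
      simpa using h
    rw [hA, alt_eq_filter rows cols rS cS hr hc, hKcast, ← hKBdef]
    exact path_filter_stable (by omega) (by omega) (by omega) (by omega) (by omega) (by omega)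
  · have hdeg : rows ≤ 0 ∨ cols ≤ 0 := by omega
    have hprod : rows * cols ≤ 0 := by
      rcases hpre with hp | hp
      · rcases hdeg with h | h
        · rw [show rows = 0 from le_antisymm h hp]; simp
        · exact mul_nonpos_iff.mpr (Or.inl ⟨hp, h⟩)
      · rcases hdeg with h | h
        · exact mul_nonpos_iff.mpr (Or.inr ⟨h, hp⟩)
        · rw [show cols = 0 from le_antisymm h hp]; simp
    rw [spiralMatrixIII_alt, if_pos hdeg]
    show spiralLoopA rows cols rS cS _ rS cS 0 1 0 1 [] = []
    exact spiralLoopA_stop _ _ _ _ _ _ _ _ _ _ _ _ (by simpa using hprod)
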